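-- pv_equiv track=rewrite | github.com/nikonlikes/MSE443-Module-3 | dashboard.py | schedule_orders
-- ===== SOURCE A (Python) =====
-- def schedule_orders(processing_times, n_conveyors, reverse=False):
--     sorted_indices = sorted(range(len(processing_times)),
--                             key=lambda i: processing_times[i], reverse=reverse)
--     loads      = [0] * n_conveyors
--     assignment = {c: [] for c in range(n_conveyors)}
--     for idx in sorted_indices:
--         c = loads.index(min(loads))
--         assignment[c].append(idx)
--         loads[c] += processing_times[idx]
--     return assignment
-- ===== SOURCE B (Python) =====
-- def schedule_orders(processing_times, n_conveyors, reverse=False):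
--     order = sorted(range(len(processing_times)),
--                    key=lambda i: processing_times[i], reverse=reverse)
--     # priority list of (load, conveyor) pairs, kept sorted ascending; the least-loaded
--     # conveyor (ties broken by smallest index) is always at the front.
--     pq = [(0, c) for c in range(n_conveyors)]
--     assignment = {c: [] for c in range(n_conveyors)}
--     for idx in order:
--         load, c = pq[0]
--         assignment[c].append(idx)
--         item = (load + processing_times[idx], c)
--         rest = pq[1:]
--         i = 0
--         while i < len(rest) and rest[i] < item:
--             i += 1
--         pq = rest[:i] + [item] + rest[i:]
--     return assignment
-- ===== Notes on version B (the rewrite author's own statement) =====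
-- stated objective: alternative
-- what changed: Instead of rescanning the loads list twice per order (min(loads) then loads.index), B maintains a priority list of (load, conveyor) pairs kept sorted ascending, popping the least-loaded conveyor from the front and re-inserting its updated pair at its sorted position.
import Mathlib
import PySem

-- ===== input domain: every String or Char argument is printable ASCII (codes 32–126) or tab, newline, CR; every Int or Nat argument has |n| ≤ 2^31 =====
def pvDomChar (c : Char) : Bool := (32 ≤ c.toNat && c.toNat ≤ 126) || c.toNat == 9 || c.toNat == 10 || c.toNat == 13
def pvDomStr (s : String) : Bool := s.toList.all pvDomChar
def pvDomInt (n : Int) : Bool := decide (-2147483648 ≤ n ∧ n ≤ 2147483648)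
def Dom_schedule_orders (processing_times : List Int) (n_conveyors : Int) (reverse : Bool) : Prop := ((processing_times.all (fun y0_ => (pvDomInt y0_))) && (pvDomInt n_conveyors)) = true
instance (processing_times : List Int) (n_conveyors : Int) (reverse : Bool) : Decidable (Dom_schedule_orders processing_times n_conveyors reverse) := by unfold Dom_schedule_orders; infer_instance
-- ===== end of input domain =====

-- B replaces A's per-order `min(loads)` + `loads.index` scans by a priority list of
-- (load, conveyor) pairs kept sorted ascending, popping the front and re-inserting the
-- updated pair at its sorted position (objective: alternative; same worst-case cost).

-- ===== PORT A =====
-- loop body of A's `for idx in sorted_indices` (state = (loads, assignment))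
def pvStepA (pt : List Int) (s : List Int × PySem.Dict Int (List Int)) (idx : Int) :
    List Int × PySem.Dict Int (List Int) :=
  match PySem.List.min? s.1 (fun x => x) with
  | none => s          -- Python: min([]) raises ValueError; excluded by Pre_
  | some m =>
    match PySem.List.index? s.1 m with
    | none => s        -- unreachable: m ∈ loads
    | some c =>
      (PySem.List.pySetD s.1 (c : Int)
         (PySem.List.pyGetD s.1 (c : Int) 0 + PySem.List.pyGetD pt idx 0),
       s.2.modify (c : Int) [] (fun l => l ++ [idx]))

def schedule_orders (processing_times : List Int) (n_conveyors : Int) (reverse : Bool) : List (Int × List Int) :=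
  let sorted_indices := PySem.List.sorted (PySem.List.pyRange 0 (processing_times.length : Int) 1)
      (fun i => PySem.List.pyGetD processing_times i 0) reverse
  let loads0 : List Int := List.replicate n_conveyors.toNat 0   -- [0] * n_conveyors
  let asg0 : PySem.Dict Int (List Int) :=
      (PySem.List.pyRange 0 n_conveyors 1).foldl (fun d c => d.insert c []) PySem.Dict.empty
  (sorted_indices.foldl (pvStepA processing_times) (loads0, asg0)).2.items

-- ===== PORT B =====
-- Python tuple comparison `(a, b) < (c, d)`
def pvLexLt (a b : Int × Int) : Bool :=
  decide (a.1 < b.1) || (decide (a.1 = b.1) && decide (a.2 < b.2))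

-- B's `while i < len(rest) and rest[i] < item: i += 1`
def pvInsPos (pq : List (Int × Int)) (item : Int × Int) (i : Nat) : Nat :=
  if h : i < pq.length then
    if pvLexLt pq[i] item then pvInsPos pq item (i + 1) else i
  else i
termination_by pq.length - i

-- loop body of B's `for idx in order` (state = (pq, assignment))
def pvStepB (pt : List Int) (s : List (Int × Int) × PySem.Dict Int (List Int)) (idx : Int) :
    List (Int × Int) × PySem.Dict Int (List Int) :=
  match s.1 with
  | [] => s            -- Python: pq[0] raises IndexError; excluded by Pre_
  | (load, c) :: rest =>        -- load, c = pq[0]; rest = pq[1:]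
    let asg := s.2.modify c [] (fun l => l ++ [idx])
    let item := (load + PySem.List.pyGetD pt idx 0, c)
    let i := pvInsPos rest item 0
    (PySem.List.slice rest none (some (i : Int)) ++ [item] ++
       PySem.List.slice rest (some (i : Int)) none, asg)

def schedule_orders_alt (processing_times : List Int) (n_conveyors : Int) (reverse : Bool) : List (Int × List Int) :=
  let order := PySem.List.sorted (PySem.List.pyRange 0 (processing_times.length : Int) 1)
      (fun i => PySem.List.pyGetD processing_times i 0) reverse
  let pq0 : List (Int × Int) := (PySem.List.pyRange 0 n_conveyors 1).map (fun c => ((0 : Int), c))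
  let asg0 : PySem.Dict Int (List Int) :=
      (PySem.List.pyRange 0 n_conveyors 1).foldl (fun d c => d.insert c []) PySem.Dict.empty
  (order.foldl (pvStepB processing_times) (pq0, asg0)).2.items

-- ===== PRECONDITION & SPEC =====
-- Pre_ excludes exactly the inputs where Python A raises: with a non-empty order list and
-- n_conveyors < 1, A's `min(loads)` is min([]) → ValueError (B's pq[0] → IndexError).
def Pre_schedule_orders (processing_times : List Int) (n_conveyors : Int) (reverse : Bool) : Prop :=
  processing_times = [] ∨ 1 ≤ n_conveyors
instance (processing_times : List Int) (n_conveyors : Int) (reverse : Bool) : Decidable (Pre_schedule_orders processing_times n_conveyors reverse) := by unfold Pre_schedule_orders; infer_instance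

def pvWitness_schedule_orders : List Int × Int × Bool := ([3, 1, 2, 1], 2, false)

def Spec_schedule_orders (processing_times : List Int) (n_conveyors : Int) (reverse : Bool) (out : List (Int × List Int)) : Prop := out = schedule_orders_alt processing_times n_conveyors reverse
instance (processing_times : List Int) (n_conveyors : Int) (reverse : Bool) (out : List (Int × List Int)) : Decidable (Spec_schedule_orders processing_times n_conveyors reverse out) := by unfold Spec_schedule_orders; infer_instance

-- ===== CLAIM (what is proved, stated in full; the proofs are below) =====
def Claim_equal_schedule_orders : Prop := ∀ (processing_times : List Int) (n_conveyors : Int) (reverse : Bool), Dom_schedule_orders processing_times n_conveyors reverse → Pre_schedule_orders processing_times n_conveyors reverse → Spec_schedule_orders processing_times n_conveyors reverse (schedule_orders processing_times n_conveyors reverse)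

-- ===== LEMMAS AND PROOFS =====

-- non-strict "≤" underlying pvLexLt
abbrev pvRle (a b : Int × Int) : Prop := pvLexLt b a = false

lemma pvInsPos_shift (p item : Int × Int) (rest : List (Int × Int)) :
    ∀ i, pvInsPos (p :: rest) item (i + 1) = pvInsPos rest item i + 1 := by
  intro i
  fun_induction pvInsPos rest item i with
  | case1 i h hlt ih =>
    rw [pvInsPos]
    simp only [List.length_cons, List.getElem_cons_succ]
    rw [dif_pos (by omega), if_pos hlt, ih]
  | case2 i h hlt =>
    rw [pvInsPos]
    simp only [List.length_cons, List.getElem_cons_succ]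
    rw [dif_pos (by omega), if_neg hlt]
  | case3 i h =>
    rw [pvInsPos, dif_neg (by simp; omega)]

lemma pvInsert_td (item : Int × Int) (rest : List (Int × Int)) :
    rest.take (pvInsPos rest item 0) ++ [item] ++ rest.drop (pvInsPos rest item 0)
    = List.orderedInsert pvRle item rest := by
  induction rest with
  | nil => simp [pvInsPos]
  | cons p rest ih =>
    rw [List.orderedInsert_cons]
    by_cases h : pvLexLt p item
    · rw [if_neg (by simp [pvRle, h])]
      rw [show pvInsPos (p :: rest) item 0 = pvInsPos rest item 0 + 1 by
        rw [pvInsPos]; simp only [List.length_cons, List.getElem_cons_zero]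
        rw [dif_pos (by omega), if_pos h]; exact pvInsPos_shift p item rest 0]
      simp [List.take_succ_cons, List.drop_succ_cons, ← ih]
    · rw [if_pos (by simp [pvRle]; simpa using h)]
      rw [show pvInsPos (p :: rest) item 0 = 0 by
        rw [pvInsPos]; simp only [List.length_cons, List.getElem_cons_zero]
        rw [dif_pos (by omega), if_neg h]]
      simp

lemma pvInsert_eq_orderedInsert (item : Int × Int) (rest : List (Int × Int)) :
    PySem.List.slice rest none (some ((pvInsPos rest item 0 : Nat) : Int)) ++ [item] ++
      PySem.List.slice rest (some ((pvInsPos rest item 0 : Nat) : Int)) none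
    = List.orderedInsert pvRle item rest := by
  rw [PySem.List.slice_to_natCast, PySem.List.slice_from_natCast]
  exact pvInsert_td item rest

lemma pvRle_iff (a b : Int × Int) : pvRle a b ↔ (a.1 < b.1 ∨ (a.1 = b.1 ∧ a.2 ≤ b.2)) := by
  simp [pvRle, pvLexLt]; omega

lemma pvRle_total : Std.Total pvRle := ⟨by intro a b; rw [pvRle_iff, pvRle_iff]; omega⟩

lemma pvRle_trans : IsTrans (Int × Int) pvRle :=
  ⟨by intro a b c; rw [pvRle_iff, pvRle_iff, pvRle_iff]; omega⟩

def pairsOf (loads : List Int) : List (Int × Int) :=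
  (PySem.List.enumerate loads 0).map (fun p => (p.2, p.1))

lemma pairsOf_append (pre suf : List Int) (x : Int) :
    pairsOf (pre ++ x :: suf) =
      pairsOf pre ++ ((x, (pre.length : Int)) ::
        (PySem.List.enumerate suf ((pre.length : Int) + 1)).map (fun p => (p.2, p.1))) := by
  simp [pairsOf, PySem.List.enumerate_append, PySem.List.enumerate_cons]

lemma mem_pairsOf (loads : List Int) (m : Int) (j : Nat) (hj : j < loads.length)
    (hv : loads[j] = m) : (m, (j : Int)) ∈ pairsOf loads := by
  simp only [pairsOf, List.mem_map]
  exact ⟨((j : Int), m), by rw [PySem.List.mem_enumerate_iff]; exact ⟨j, hj, by simp [hv]⟩, rfl⟩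

lemma init_pairs (n : Int) :
    ((PySem.List.pyRange 0 n 1).map (fun c => ((0 : Int), c))) = pairsOf (List.replicate n.toNat 0) := by
  rw [pairsOf, PySem.List.enumerate_eq_map_pyRange (d := 0)]
  simp only [PySem.List.len_eq, List.length_replicate, List.map_map]
  have hr : PySem.List.pyRange 0 ((n.toNat : Nat) : Int) 1 = PySem.List.pyRange 0 n 1 := by
    by_cases h : 0 ≤ n
    · rw [Int.toNat_of_nonneg h]
    · rw [PySem.List.pyRange_one_eq_nil (by omega), PySem.List.pyRange_one_eq_nil (by omega)]
  rw [hr]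
  refine List.map_congr_left (fun c hc => ?_)
  rw [PySem.List.mem_pyRange_one] at hc
  simp only [Function.comp]
  rw [PySem.List.pyGetD_of_nonneg (h := hc.1), List.getD_replicate]
  omega

lemma init_sorted (n : Int) :
    ((PySem.List.pyRange 0 n 1).map (fun c => ((0 : Int), c))).Pairwise pvRle := by
  refine (List.pairwise_map).2 (List.Pairwise.imp ?_ (PySem.List.pairwise_lt_pyRange_one 0 n))
  intro a b h
  simp [pvRle, pvLexLt]; omega

lemma step_inv (pt : List Int) (idx : Int) (loads : List Int) (pq : List (Int × Int))
    (d : PySem.Dict Int (List Int))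
    (hperm : pq.Perm (pairsOf loads)) (hsort : pq.Pairwise pvRle) :
    (pvStepA pt (loads, d) idx).2 = (pvStepB pt (pq, d) idx).2 ∧
      (pvStepB pt (pq, d) idx).1.Perm (pairsOf (pvStepA pt (loads, d) idx).1) ∧
      (pvStepB pt (pq, d) idx).1.Pairwise pvRle := by
  cases pq with
  | nil =>
    have hp0 : pairsOf loads = [] := hperm.symm.eq_nil
    have hl0 : loads = [] := by
      have := congrArg List.length hp0
      simpa [pairsOf, PySem.List.length_enumerate] using this
    subst hl0
    refine ⟨?_, ?_, ?_⟩ <;>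
      simp [pvStepA, pvStepB, PySem.List.min?, pairsOf]
  | cons hd rest =>
    obtain ⟨m₀, c₀⟩ := hd
    have hmem : (m₀, c₀) ∈ pairsOf loads := hperm.subset (List.mem_cons_self)
    obtain ⟨k, hk, hck, hmk⟩ :
        ∃ (k : Nat) (_ : k < loads.length), c₀ = (k : Int) ∧ loads[k] = m₀ := by
      simp only [pairsOf, List.mem_map] at hmem
      obtain ⟨p, hp, hpe⟩ := hmem
      rw [PySem.List.mem_enumerate_iff] at hp
      obtain ⟨k, hklt, rfl⟩ := hp
      refine ⟨k, hklt, ?_⟩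
      have := hpe.symm
      simp at this
      exact ⟨this.2, this.1.symm⟩
    subst hck
    have hdec : loads = loads.take k ++ m₀ :: loads.drop (k + 1) := by
      conv_lhs => rw [← List.take_append_drop k loads]
      rw [List.drop_eq_getElem_cons hk, hmk]
    have hmemload : m₀ ∈ loads := hmk ▸ List.getElem_mem hk
    have hub : ∀ y ∈ loads, m₀ ≤ y := by
      intro y hy
      obtain ⟨j, hj, rfl⟩ := List.mem_iff_getElem.mp hy
      have hin : (loads[j], (j : Int)) ∈ (m₀, (k : Int)) :: rest :=
        hperm.mem_iff.2 (mem_pairsOf loads _ j hj rfl)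
      rcases List.mem_cons.mp hin with heq | hr
      · simp at heq; omega
      · have := (List.pairwise_cons.mp hsort).1 _ hr
        rw [pvRle_iff] at this; simp at this; omega
    have hmin : PySem.List.min? loads (fun x => x) = some m₀ := by
      obtain ⟨m, hm⟩ : ∃ m, PySem.List.min? loads (fun x : Int => x) = some m := by
        cases h : PySem.List.min? loads (fun x : Int => x) with
        | none => rw [PySem.List.min?_eq_none_iff] at h; simp [h] at hk
        | some m => exact ⟨m, rfl⟩
      have h1 := PySem.List.min?_isMin hm
      have h2 := PySem.List.min?_mem hm
      rw [hm, le_antisymm (h1 m₀ hmemload) (hub m h2)]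
    have hidx : PySem.List.index? loads m₀ = some k := by
      rw [PySem.List.index?_eq_some_iff]
      refine ⟨loads.take k, loads.drop (k + 1), hdec, by rw [List.length_take]; omega, ?_⟩
      intro hmt
      obtain ⟨j, hj, hjv⟩ := List.mem_take_iff_getElem.mp hmt
      have hjk : j < k := by omega
      have hin : (m₀, (j : Int)) ∈ (m₀, (k : Int)) :: rest :=
        hperm.mem_iff.2 (mem_pairsOf loads _ j (by omega) (by simpa using hjv))
      rcases List.mem_cons.mp hin with heq | hr
      · simp at heq; omega
      · have := (List.pairwise_cons.mp hsort).1 _ hr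
        rw [pvRle_iff] at this; simp at this; omega
    -- unfold both step functions
    simp only [pvStepA, pvStepB, hmin, hidx]
    have hget : PySem.List.pyGetD loads ((k : Nat) : Int) 0 = m₀ := by
      rw [PySem.List.pyGetD_natCast, List.getD_eq_getElem _ _ hk, hmk]
    have hsetd : PySem.List.pySetD loads ((k : Nat) : Int)
        (PySem.List.pyGetD loads ((k : Nat) : Int) 0 + PySem.List.pyGetD pt idx 0)
        = loads.take k ++ (m₀ + PySem.List.pyGetD pt idx 0) :: loads.drop (k + 1) := by
      rw [hget, PySem.List.pySetD_natCast]
      conv_lhs => rw [hdec]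
      rw [List.set_append_right _ _ (by simp [List.length_take])]
      simp [List.length_take, Nat.min_eq_left (le_of_lt hk)]
    have hlen_take : (loads.take k).length = k := by rw [List.length_take]; omega
    refine ⟨?_, ?_, ?_⟩
    · trivial
    · -- permutation
      rw [pvInsert_eq_orderedInsert, hsetd, pairsOf_append, hlen_take]
      have hrest : rest.Perm (pairsOf (loads.take k) ++
          (PySem.List.enumerate (loads.drop (k + 1)) ((k : Int) + 1)).map (fun p => (p.2, p.1))) := by
        have h1 : ((m₀, (k : Int)) :: rest).Perm
            ((m₀, (k : Int)) :: (pairsOf (loads.take k) ++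
              (PySem.List.enumerate (loads.drop (k + 1)) ((k : Int) + 1)).map (fun p => (p.2, p.1)))) := by
          refine hperm.trans ?_
          conv_lhs => rw [hdec]
          rw [pairsOf_append, hlen_take]
          exact List.perm_middle
        exact h1.cons_inv
      refine ((List.perm_orderedInsert _ _ _).trans (hrest.cons _)).trans ?_
      exact List.perm_middle.symm
    · -- sortedness
      rw [pvInsert_eq_orderedInsert]
      haveI := pvRle_total
      haveI := pvRle_trans
      exact (List.pairwise_cons.mp hsort).2.orderedInsert _ _

lemma fold_eq (pt : List Int) : ∀ (ids : List Int) (loads : List Int) (pq : List (Int × Int))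
    (d : PySem.Dict Int (List Int)), pq.Perm (pairsOf loads) → pq.Pairwise pvRle →
    (ids.foldl (pvStepA pt) (loads, d)).2 = (ids.foldl (pvStepB pt) (pq, d)).2 := by
  intro ids
  induction ids with
  | nil => intro loads pq d _ _; rfl
  | cons idx ids ih =>
    intro loads pq d hperm hsort
    obtain ⟨hd, hp, hs⟩ := step_inv pt idx loads pq d hperm hsort
    simp only [List.foldl_cons]
    rw [show pvStepA pt (loads, d) idx
        = ((pvStepA pt (loads, d) idx).1, (pvStepA pt (loads, d) idx).2) from rfl,
      show pvStepB pt (pq, d) idx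
        = ((pvStepB pt (pq, d) idx).1, (pvStepB pt (pq, d) idx).2) from rfl, ← hd]
    exact ih _ _ _ hp hs

-- ===== VERDICT (by name: the statement is the Claim_ definition above) =====
theorem schedule_orders_spec : Claim_equal_schedule_orders := by
  intro pt n rev _ _
  unfold Spec_schedule_orders schedule_orders schedule_orders_alt
  exact congrArg PySem.Dict.items
    (fold_eq pt _ _ _ _ ((init_pairs n).symm ▸ List.Perm.refl _) (init_sorted n))
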